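-- pv_equiv track=rewrite | github.com/vadimsteshkin/KEGE2022 | решение задач с годового курса stepik/16/13.py | F
-- ===== SOURCE A (Python) =====
-- def F(n):
--     if n < 10:
--         return n
--     else:
--         m = F(n // 10)
--         d = m % 10;
--         if m < d:
--             return d
--         else:
--             return m
-- ===== SOURCE B (Python) =====
-- def F(n):
--     if n < 10:
--         return n
--     p = 10
--     while p * 10 <= n:
--         p *= 10
--     return n // p
-- ===== Notes on version B (the rewrite author's own statement) =====
-- stated objective: alternative
-- what changed: Instead of repeated division (A's recursion strips one digit per step, with a redundant m%10 comparison that never fires), B grows a power-of-ten accumulator to the largest power <= n and extracts the leading digit with a single floor division.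
import Mathlib
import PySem

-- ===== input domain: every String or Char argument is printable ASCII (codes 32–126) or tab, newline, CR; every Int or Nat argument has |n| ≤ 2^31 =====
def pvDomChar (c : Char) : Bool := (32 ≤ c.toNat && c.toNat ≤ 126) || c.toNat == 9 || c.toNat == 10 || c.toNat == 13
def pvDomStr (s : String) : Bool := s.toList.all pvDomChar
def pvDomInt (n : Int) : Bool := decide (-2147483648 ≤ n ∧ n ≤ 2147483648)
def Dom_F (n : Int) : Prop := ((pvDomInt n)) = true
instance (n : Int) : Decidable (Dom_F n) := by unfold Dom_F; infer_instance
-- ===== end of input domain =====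

-- B replaces A's digit-stripping recursion (whose m % 10 comparison never fires) by a
-- different algorithm: grow a power-of-ten accumulator, then one division; objective: alternative.

-- termination helper for A's recursion: n // 10 shrinks for n ≥ 10
theorem pvFloordiv_toNat_lt (n : Int) (h : ¬ n < 10) :
    (PySem.Int.floordiv n 10).toNat < n.toNat := by
  rw [PySem.Int.floordiv_eq_ediv_of_pos (by omega : (0:Int) < 10)]
  omega

-- ===== PORT A =====
def F (n : Int) : Int :=
  if n < 10 then n
  else
    let m := F (PySem.Int.floordiv n 10)
    let d := PySem.Int.mod m 10
    if m < d then d else m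
termination_by n.toNat
decreasing_by exact pvFloordiv_toNat_lt n (by assumption)

-- ===== PORT B =====
-- the `while p * 10 <= n: p *= 10` loop (p is always positive, carried as a hypothesis)
def pvPowLoop (n : Int) (p : Int) (hp : 0 < p) : Int :=
  if p * 10 ≤ n then pvPowLoop n (p * 10) (by omega) else PySem.Int.floordiv n p
termination_by (n - p).toNat
decreasing_by omega

def F_alt (n : Int) : Int :=
  if n < 10 then n else pvPowLoop n 10 (by omega)

-- ===== PRECONDITION & SPEC =====
def Spec_F (n : Int) (out : Int) : Prop := out = F_alt n
instance (n : Int) (out : Int) : Decidable (Spec_F n out) := by unfold Spec_F; infer_instance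

-- ===== CLAIM (what is proved, stated in full; the proofs are below) =====
def Claim_equal_F : Prop := ∀ (n : Int), Dom_F n → Spec_F n (F n)

-- ===== LEMMAS AND PROOFS =====

-- A's result is always < 10
theorem F_lt_ten (n : Int) : F n < 10 := by
  rw [F]
  split
  · omega
  · have ih := F_lt_ten (PySem.Int.floordiv n 10)
    have hm : PySem.Int.mod (F (PySem.Int.floordiv n 10)) 10
        = (F (PySem.Int.floordiv n 10)) % 10 := by
      rw [PySem.Int.mod_eq_emod_of_pos (by omega : (0:Int) < 10)]
    simp only [hm]
    split <;> omega
termination_by n.toNat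
decreasing_by exact pvFloordiv_toNat_lt n (by assumption)

-- A's result is ≥ 1 when n ≥ 1
theorem F_pos (n : Int) (h : 1 ≤ n) : 1 ≤ F n := by
  rw [F]
  split
  · omega
  · rename_i h10
    have hq : 1 ≤ PySem.Int.floordiv n 10 := by
      rw [PySem.Int.floordiv_eq_ediv_of_pos (by omega : (0:Int) < 10)]
      omega
    have ih := F_pos (PySem.Int.floordiv n 10) hq
    have hm : PySem.Int.mod (F (PySem.Int.floordiv n 10)) 10
        = (F (PySem.Int.floordiv n 10)) % 10 := by
      rw [PySem.Int.mod_eq_emod_of_pos (by omega : (0:Int) < 10)]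
    simp only [hm]
    split <;> omega
termination_by n.toNat
decreasing_by exact pvFloordiv_toNat_lt n (by assumption)

-- A's recursion collapses: for n ≥ 10, F n = F (n // 10) — the m < m % 10 branch never fires
theorem F_step (n : Int) (h : ¬ n < 10) : F n = F (PySem.Int.floordiv n 10) := by
  rw [F, if_neg h]
  have hq : 1 ≤ PySem.Int.floordiv n 10 := by
    rw [PySem.Int.floordiv_eq_ediv_of_pos (by omega : (0:Int) < 10)]
    omega
  have h1 := F_pos (PySem.Int.floordiv n 10) hq
  have h2 := F_lt_ten (PySem.Int.floordiv n 10)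
  have hmod : PySem.Int.mod (F (PySem.Int.floordiv n 10)) 10
      = F (PySem.Int.floordiv n 10) := by
    rw [PySem.Int.mod_eq_emod_of_pos (by omega : (0:Int) < 10)]
    omega
  simp only [hmod, lt_irrefl, if_false]

-- loop invariant: for 0 < p ≤ n, the power loop computes F (n // p)
theorem pvPowLoop_eq_F (n p : Int) (hp : 0 < p) (hpn : p ≤ n) :
    pvPowLoop n p hp = F (PySem.Int.floordiv n p) := by
  rw [pvPowLoop]
  have hfd : ∀ q : Int, 0 < q → PySem.Int.floordiv n q = n / q := fun q hq =>
    PySem.Int.floordiv_eq_ediv_of_pos hq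
  split
  · rename_i hle
    rw [pvPowLoop_eq_F n (p * 10) (by omega) hle]
    have h10 : ¬ PySem.Int.floordiv n p < 10 := by
      rw [hfd p hp]
      have h1 : p * 10 / p ≤ n / p := Int.ediv_le_ediv hp (by omega)
      rw [Int.mul_ediv_cancel_left _ (by omega : p ≠ 0)] at h1
      omega
    rw [F_step (PySem.Int.floordiv n p) h10]
    congr 1
    rw [hfd p hp, hfd (p * 10) (by omega),
        PySem.Int.floordiv_eq_ediv_of_pos (by omega : (0:Int) < 10),
        Int.ediv_ediv_of_nonneg (by omega : (0:Int) ≤ p)]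
  · rename_i hgt
    rw [hfd p hp]
    have h0 : 0 ≤ n / p := Int.ediv_nonneg (by omega) (by omega)
    have h9 : n / p < 10 := by
      rw [Int.ediv_lt_iff_lt_mul hp]
      omega
    rw [F, if_pos (by omega)]
termination_by (n - p).toNat
decreasing_by omega

theorem F_eq_F_alt (n : Int) : F n = F_alt n := by
  rw [F_alt]
  split
  · rename_i h; rw [F, if_pos h]
  · rename_i h
    rw [pvPowLoop_eq_F n 10 (by omega) (by omega), F_step n h]

-- ===== VERDICT (by name: the statement is the Claim_ definition above) =====
theorem F_spec : Claim_equal_F := by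
  intro n _
  unfold Spec_F
  exact F_eq_F_alt n
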